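-- pv_equiv track=rewrite | github.com/paiml/depyler | examples/hard_range_iteration.py | harmonic_sum_scaled
-- ===== SOURCE A (Python) =====
-- def harmonic_sum_scaled(n: int, scale: int) -> int:
--     """Compute scaled harmonic sum (scale/1 + scale/2 + ... + scale/n)."""
--     if n <= 0 or scale <= 0:
--         return 0
--     total: int = 0
--     i: int = 1
--     while i <= n:
--         total = total + scale // i
--         i = i + 1
--     return total
-- ===== SOURCE B (Python) =====
-- def harmonic_sum_scaled(n: int, scale: int) -> int:
--     """Divisor blocking: floor(scale/i) is constant on runs of i; sum each run at once."""
--     if n <= 0 or scale <= 0: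
--         return 0
--     total = 0
--     i = 1
--     while i <= n:
--         q = scale // i
--         if q == 0:
--             break  # every remaining term is 0
--         j = min(n, scale // q)  # last index with scale // j == q
--         total += q * (j - i + 1)
--         i = j + 1
--     return total
-- ===== Notes on version B (the rewrite author's own statement) =====
-- stated objective: faster
-- what changed: Replaces the per-index loop adding scale//i for each i=1..n with divisor blocking: floor(scale/i) takes O(sqrt(scale)) distinct values, so B jumps over each maximal run [i, min(n, scale//q)] of constant quotient q and adds q*(run length) once, stopping early once the quotient reaches 0.
import Mathlib
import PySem

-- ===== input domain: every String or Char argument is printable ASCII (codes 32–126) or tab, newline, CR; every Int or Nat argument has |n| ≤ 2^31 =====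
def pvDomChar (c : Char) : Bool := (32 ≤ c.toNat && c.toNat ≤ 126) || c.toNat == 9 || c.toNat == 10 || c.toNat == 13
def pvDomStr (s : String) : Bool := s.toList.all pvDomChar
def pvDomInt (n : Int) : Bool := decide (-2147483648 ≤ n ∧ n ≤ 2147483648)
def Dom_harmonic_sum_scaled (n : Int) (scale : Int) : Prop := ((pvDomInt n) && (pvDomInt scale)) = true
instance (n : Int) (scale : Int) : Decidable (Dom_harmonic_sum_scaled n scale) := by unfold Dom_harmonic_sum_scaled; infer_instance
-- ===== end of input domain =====

-- B replaces A's per-index O(n) loop by divisor blocking (sum each maximal run of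
-- constant quotient floor(scale/i) at once), O(min(n, sqrt(scale))) iterations.

-- ===== PORT A =====
-- A's while loop: i walks 1..n, adding scale // i each step.
def pvLoopA (n : Int) (scale : Int) (i : Int) (total : Int) : Int :=
  if i ≤ n then pvLoopA n scale (i + 1) (total + PySem.Int.floordiv scale i) else total
termination_by (n + 1 - i).toNat
decreasing_by omega

def harmonic_sum_scaled (n : Int) (scale : Int) : Int :=
  if n ≤ 0 ∨ scale ≤ 0 then 0 else pvLoopA n scale 1 0

-- ===== PORT B =====
-- B's while loop, fuel-totalised ((n+1).toNat fuel always suffices: i advances past j ≥ i each pass).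
def pvLoopB (n : Int) (scale : Int) : Nat → Int → Int → Int
  | 0, _, total => total
  | fuel + 1, i, total =>
    if i ≤ n then
      let q := PySem.Int.floordiv scale i
      if q = 0 then total
      else
        let j := min n (PySem.Int.floordiv scale q)
        pvLoopB n scale fuel (j + 1) (total + q * (j - i + 1))
    else total

def harmonic_sum_scaled_alt (n : Int) (scale : Int) : Int :=
  if n ≤ 0 ∨ scale ≤ 0 then 0 else pvLoopB n scale (n + 1).toNat 1 0

-- ===== PRECONDITION & SPEC =====
def Spec_harmonic_sum_scaled (n : Int) (scale : Int) (out : Int) : Prop := out = harmonic_sum_scaled_alt n scale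
instance (n : Int) (scale : Int) (out : Int) : Decidable (Spec_harmonic_sum_scaled n scale out) := by unfold Spec_harmonic_sum_scaled; infer_instance

-- ===== CLAIM (what is proved, stated in full; the proofs are below) =====
def Claim_equal_harmonic_sum_scaled : Prop := ∀ (n : Int) (scale : Int), Dom_harmonic_sum_scaled n scale → Spec_harmonic_sum_scaled n scale (harmonic_sum_scaled n scale)

-- ===== LEMMAS AND PROOFS =====

-- A's loop over a run [i, j] on which every quotient equals q adds q * (run length).
theorem pvLoopA_block (d : Nat) : ∀ (n scale q i j total : Int),
    (j + 1 - i).toNat = d → i ≤ j + 1 → j ≤ n →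
    (∀ k, i ≤ k → k ≤ j → PySem.Int.floordiv scale k = q) →
    pvLoopA n scale i total = pvLoopA n scale (j + 1) (total + q * (j - i + 1)) := by
  induction d with
  | zero =>
    intro n scale q i j total hd hij hjn _
    have : i = j + 1 := by omega
    subst this
    have : total + q * (j - (j + 1) + 1) = total := by ring
    rw [this]
  | succ d ih =>
    intro n scale q i j total hd hij hjn hq
    have hiljn : i ≤ j := by omega
    rw [pvLoopA, if_pos (by omega : i ≤ n), hq i le_rfl hiljn]
    have h := ih n scale q (i + 1) j (total + q) (by omega) (by omega) hjn
      (fun k hk1 hk2 => hq k (by omega) hk2)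
    rw [h]
    have : total + q + q * (j - (i + 1) + 1) = total + q * (j - i + 1) := by ring
    rw [this]

-- once i > n, A's loop stops
theorem pvLoopA_stop (n scale i total : Int) (h : ¬ i ≤ n) :
    pvLoopA n scale i total = total := by
  rw [pvLoopA, if_neg h]

-- B's loop equals A's loop from any live state.
theorem pvLoop_eq (fuel : Nat) : ∀ (n scale i total : Int),
    0 < i → 0 < scale → (n + 1 - i).toNat ≤ fuel →
    pvLoopB n scale fuel i total = pvLoopA n scale i total := by
  induction fuel with
  | zero =>
    intro n scale i total hi hs hf
    rw [pvLoopB, pvLoopA_stop _ _ _ _ (by omega)]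
  | succ fuel ih =>
    intro n scale i total hi hs hf
    by_cases hin : i ≤ n
    · rw [pvLoopB, if_pos hin]
      simp only []
      set q := PySem.Int.floordiv scale i with hqdef
      rw [eq_comm] at hqdef
      have hq0 : 0 ≤ q := by
        rw [← hqdef]
        exact (PySem.Int.le_floordiv_iff_mul_le hi).mpr (by simpa using hs.le)
      by_cases hq : q = 0
      · rw [if_pos hq]
        -- every remaining quotient is 0: scale < i
        have hsi : scale < i := by
          have h1 : PySem.Int.floordiv scale i < 1 := by rw [hqdef]; omega
          have := (PySem.Int.floordiv_lt_iff_lt_mul hi).mp h1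
          linarith [one_mul i]
        have hzero : ∀ k, i ≤ k → k ≤ n → PySem.Int.floordiv scale k = 0 := by
          intro k hk1 hk2
          have hk0 : (0 : Int) < k := by omega
          have h1 : PySem.Int.floordiv scale k < 1 :=
            (PySem.Int.floordiv_lt_iff_lt_mul hk0).mpr (by omega)
          have h2 : (0 : Int) ≤ PySem.Int.floordiv scale k :=
            (PySem.Int.le_floordiv_iff_mul_le hk0).mpr (by omega)
          omega
        rw [pvLoopA_block ((n + 1 - i).toNat) n scale 0 i n total rfl (by omega) le_rfl hzero]
        rw [pvLoopA_stop _ _ _ _ (by omega)]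
        ring
      · rw [if_neg hq]
        have hqpos : 0 < q := by omega
        have hqi : q * i ≤ scale := (PySem.Int.le_floordiv_iff_mul_le hi).mp hqdef.ge
        have hisq : i ≤ PySem.Int.floordiv scale q :=
          (PySem.Int.le_floordiv_iff_mul_le hqpos).mpr (by linarith [hqi, mul_comm q i])
        set j := min n (PySem.Int.floordiv scale q) with hjdef
        have hij : i ≤ j := le_min hin hisq
        have hjn : j ≤ n := min_le_left _ _
        have hconst : ∀ k, i ≤ k → k ≤ j → PySem.Int.floordiv scale k = q := by
          intro k hk1 hk2
          have hk0 : (0 : Int) < k := by omega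
          have hksq : k ≤ PySem.Int.floordiv scale q := le_trans hk2 (min_le_right _ _)
          have hlow : q ≤ PySem.Int.floordiv scale k := by
            have := (PySem.Int.le_floordiv_iff_mul_le hqpos).mp hksq
            exact (PySem.Int.le_floordiv_iff_mul_le hk0).mpr (by linarith [mul_comm k q])
          have hup : PySem.Int.floordiv scale k < q + 1 := by
            have hsc : scale < (q + 1) * i :=
              (PySem.Int.floordiv_lt_iff_lt_mul hi).mp (by omega)
            exact (PySem.Int.floordiv_lt_iff_lt_mul hk0).mpr
              (lt_of_lt_of_le hsc (by nlinarith))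
          omega
        rw [pvLoopA_block ((j + 1 - i).toNat) n scale q i j total rfl (by omega) hjn hconst]
        exact ih n scale (j + 1) (total + q * (j - i + 1)) (by omega) hs (by omega)
    · rw [pvLoopB, if_neg hin, pvLoopA_stop _ _ _ _ hin]

-- ===== VERDICT (by name: the statement is the Claim_ definition above) =====
theorem harmonic_sum_scaled_spec : Claim_equal_harmonic_sum_scaled := by
  intro n scale _
  unfold Spec_harmonic_sum_scaled harmonic_sum_scaled harmonic_sum_scaled_alt
  by_cases h : n ≤ 0 ∨ scale ≤ 0
  · rw [if_pos h, if_pos h]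
  · rw [if_neg h, if_neg h]
    push Not at h
    exact (pvLoop_eq (n + 1).toNat n scale 1 0 one_pos h.2 (by omega)).symm
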